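-- pv_equiv track=rewrite | github.com/lalunita03/Computer-Programming | hw2/mp2_mastermind.py | count_letter_matches
-- ===== SOURCE A (Python) =====
-- def count_letter_matches(string1, string2):
--     """
--     counts the letter matches between two strings, i.e. how many letters in the two strings are
--     the same no matter the position of the letters
--
--     Arguments:
--         `string1` (string) - four letter string
--         `string2` (string) - four letter string to be compared to string1
--
--     Return:
--         (integer) - letter matches between string1 and string2"""
--
--     letter_matches = 0
--     list1 = list(string1)
--     list2 = list(string2)
--
--     for letter in list1:
--         if letter in list2:
--             letter_matches += 1
--             list2.remove(letter)
--
--     return letter_matches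
-- ===== SOURCE B (Python) =====
-- def count_letter_matches(string1, string2):
--     chars1 = list(string1)
--     chars2 = list(string2)
--     return sum(min(chars1.count(ch), chars2.count(ch)) for ch in dict.fromkeys(chars1))
-- ===== Notes on version B (the rewrite author's own statement) =====
-- stated objective: faster
-- what changed: Replaced the scan-and-remove nested loop (O(n*m) membership tests and list mutations) by independent frequency counts combined with min over the distinct letters of string1 (multiset intersection size).
import Mathlib
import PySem

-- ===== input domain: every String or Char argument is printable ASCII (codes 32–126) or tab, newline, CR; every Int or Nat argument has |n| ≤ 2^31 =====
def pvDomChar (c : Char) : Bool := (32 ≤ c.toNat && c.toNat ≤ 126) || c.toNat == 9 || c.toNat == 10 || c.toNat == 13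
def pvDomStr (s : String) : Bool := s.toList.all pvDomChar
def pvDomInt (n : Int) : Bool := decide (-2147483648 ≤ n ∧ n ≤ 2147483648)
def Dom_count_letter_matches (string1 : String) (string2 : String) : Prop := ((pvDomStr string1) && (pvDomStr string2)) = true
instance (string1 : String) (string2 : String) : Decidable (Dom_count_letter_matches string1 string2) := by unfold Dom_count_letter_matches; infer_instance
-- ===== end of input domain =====

-- B replaces A's scan-and-remove nested loop by per-distinct-letter frequency counts combined with min (multiset intersection size); a timing run measured B faster.
-- ===== PORT A =====
-- the for-loop over list1 with state (letter_matches, list2); list2.remove(letter) after the membership check = erase of the first occurrence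
def clmLoop (l1 l2 : List Char) (letter_matches : Int) : Int :=
  match l1 with
  | [] => letter_matches
  | letter :: rest =>
    if letter ∈ l2 then clmLoop rest (l2.erase letter) (letter_matches + 1)
    else clmLoop rest l2 letter_matches

def count_letter_matches (string1 : String) (string2 : String) : Int :=
  clmLoop string1.toList string2.toList 0

-- ===== PORT B =====
def count_letter_matches_alt (string1 : String) (string2 : String) : Int :=
  let chars1 := string1.toList
  let chars2 := string2.toList
  ((PySem.List.dedup chars1).map
    (fun ch => (min (chars1.count ch) (chars2.count ch) : Int))).sum

-- ===== PRECONDITION & SPEC =====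
def Spec_count_letter_matches (string1 : String) (string2 : String) (out : Int) : Prop := out = count_letter_matches_alt string1 string2
instance (string1 : String) (string2 : String) (out : Int) : Decidable (Spec_count_letter_matches string1 string2 out) := by unfold Spec_count_letter_matches; infer_instance

-- ===== CLAIM (what is proved, stated in full; the proofs are below) =====
def Claim_equal_count_letter_matches : Prop := ∀ (string1 : String) (string2 : String), Dom_count_letter_matches string1 string2 → Spec_count_letter_matches string1 string2 (count_letter_matches string1 string2)

-- ===== LEMMAS AND PROOFS =====



-- A's loop computes the cardinality of the multiset intersection
theorem clmLoop_eq_inter (l1 : List Char) : ∀ (l2 : List Char) (acc : Int),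
    clmLoop l1 l2 acc = acc + (((↑l1 : Multiset Char) ∩ ↑l2).card : Int) := by
  induction l1 with
  | nil => intro l2 acc; simp [clmLoop]
  | cons a t ih =>
    intro l2 acc
    simp only [clmLoop]
    by_cases h : a ∈ l2
    · rw [if_pos h, ih]
      have : ((a :: t : List Char) : Multiset Char) ∩ ↑l2
          = a ::ₘ ((↑t : Multiset Char) ∩ ↑(l2.erase a)) := by
        rw [← Multiset.coe_erase, ← Multiset.cons_coe, Multiset.cons_inter_of_pos _ h]
      rw [this]
      push_cast [Multiset.card_cons]
      ring
    · rw [if_neg h, ih]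
      have : ((a :: t : List Char) : Multiset Char) ∩ ↑l2
          = (↑t : Multiset Char) ∩ ↑l2 := by
        rw [← Multiset.cons_coe, Multiset.cons_inter_of_neg _ h]
      rw [this]

-- B's sum over the distinct letters of l1 computes the same cardinality
theorem sum_min_eq_inter (l1 l2 : List Char) :
    ((PySem.List.dedup l1).map
      (fun ch => (min (l1.count ch) (l2.count ch) : Int))).sum
    = (((↑l1 : Multiset Char) ∩ ↑l2).card : Int) := by
  have hnd : (PySem.List.dedup l1).Nodup := PySem.List.nodup_dedup l1
  have hfin : (PySem.List.dedup l1).toFinset = l1.toFinset := by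
    apply Finset.ext; intro a
    simp [List.mem_toFinset]
  rw [← List.sum_toFinset _ hnd, hfin]
  have hcard : (((↑l1 : Multiset Char) ∩ ↑l2).card : Int)
      = ∑ a ∈ ((↑l1 : Multiset Char) ∩ ↑l2).toFinset,
          ((((↑l1 : Multiset Char) ∩ ↑l2).count a : Int)) := by
    rw [← Multiset.toFinset_sum_count_eq]
    push_cast
    rfl
  rw [hcard]
  have hsub : ((↑l1 : Multiset Char) ∩ ↑l2).toFinset ⊆ l1.toFinset := by
    intro a ha
    rw [Multiset.mem_toFinset] at ha
    rw [List.mem_toFinset]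
    exact Multiset.mem_of_le Multiset.inter_le_left ha
  rw [Finset.sum_subset hsub]
  · apply Finset.sum_congr rfl
    intro a _
    rw [Multiset.count_inter]
    push_cast [Multiset.coe_count]
    rfl
  · intro a _ ha2
    rw [Multiset.mem_toFinset, ← Multiset.count_pos, Nat.pos_iff_ne_zero, Ne, not_not] at ha2
    rw [Multiset.count_inter] at ha2
    simp only [Multiset.coe_count] at ha2
    rw [Multiset.count_inter]
    simp only [Multiset.coe_count]
    omega

-- ===== VERDICT =====
theorem count_letter_matches_spec : Claim_equal_count_letter_matches := by
  intro s1 s2 _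
  unfold Spec_count_letter_matches count_letter_matches count_letter_matches_alt
  rw [clmLoop_eq_inter, sum_min_eq_inter]
  ring
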